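-- pv_equiv track=rewrite | github.com/Wozniak456/TOPSIS-method | main.py | get_pis_nis
-- ===== SOURCE A (Python) =====
-- def get_pis_nis(weighted_matrix):
--     n, m = len(weighted_matrix), len(weighted_matrix[0])
--     nis = []
--     pis = []
--     for k in range(m):
--         column_values = [row[k] for row in weighted_matrix]
--         pis.append(max(column_values))
--         nis.append(min(column_values))
--     return pis, nis
-- ===== SOURCE B (Python) =====
-- def get_pis_nis(weighted_matrix):
--     m = len(weighted_matrix[0])
--     first = weighted_matrix[0]
--     pis = list(first)
--     nis = list(first)
--     for row in weighted_matrix[1:]: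
--         for k in range(m):
--             v = row[k]
--             if v > pis[k]:
--                 pis[k] = v
--             if v < nis[k]:
--                 nis[k] = v
--     return pis, nis
-- ===== Notes on version B (the rewrite author's own statement) =====
-- stated objective: alternative
-- what changed: B makes a single row-major sweep maintaining per-column max/min accumulators seeded from the first row, instead of extracting each column as a list and scanning it with max/min per column index.
import Mathlib
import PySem

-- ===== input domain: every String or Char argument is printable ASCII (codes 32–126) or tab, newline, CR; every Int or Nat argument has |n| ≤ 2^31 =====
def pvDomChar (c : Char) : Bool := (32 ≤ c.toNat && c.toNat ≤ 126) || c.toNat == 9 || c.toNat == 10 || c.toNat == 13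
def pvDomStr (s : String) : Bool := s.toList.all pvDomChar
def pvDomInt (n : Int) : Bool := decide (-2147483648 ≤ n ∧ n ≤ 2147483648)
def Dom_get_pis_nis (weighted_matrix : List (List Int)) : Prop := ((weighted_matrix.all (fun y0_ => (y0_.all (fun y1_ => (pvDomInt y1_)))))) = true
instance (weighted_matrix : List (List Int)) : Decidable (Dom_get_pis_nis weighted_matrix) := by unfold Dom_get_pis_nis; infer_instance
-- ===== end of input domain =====

-- B replaces A's column-extraction loops by a single row-major sweep with per-column max/min accumulators (alternative decomposition, same cost).


-- ===== PORT A =====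
-- Python's max()/min() on a nonempty list; the [] case is unreachable inside Pre_.
def pyMax (l : List Int) : Int :=
  match l with
  | [] => 0
  | x :: xs => xs.foldl max x

def pyMin (l : List Int) : Int :=
  match l with
  | [] => 0
  | x :: xs => xs.foldl min x

-- row[k] is in range for every row inside Pre_; getD 0 is exact there.
def get_pis_nis (weighted_matrix : List (List Int)) : List Int × List Int :=
  let m := (weighted_matrix.headD []).length
  let pis := (List.range m).map (fun k => pyMax (weighted_matrix.map (fun row => row.getD k 0)))
  let nis := (List.range m).map (fun k => pyMin (weighted_matrix.map (fun row => row.getD k 0)))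
  (pis, nis)

-- ===== PORT B =====
def get_pis_nis_alt (weighted_matrix : List (List Int)) : List Int × List Int :=
  match weighted_matrix with
  | [] => ([], [])  -- unreachable inside Pre_ (Python raises IndexError)
  | first :: rest =>
    let m := first.length
    rest.foldl
      (fun acc row =>
        ((List.range m).map (fun k => max (acc.1.getD k 0) (row.getD k 0)),
         (List.range m).map (fun k => min (acc.2.getD k 0) (row.getD k 0))))
      (first, first)

-- ===== PRECONDITION & SPEC =====
-- Pre_ excludes exactly the inputs where both Pythons raise IndexError: the empty
-- matrix, and ragged matrices with some row shorter than the first row.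
def Pre_get_pis_nis (weighted_matrix : List (List Int)) : Prop :=
  weighted_matrix ≠ [] ∧
  ∀ row ∈ weighted_matrix, (weighted_matrix.headD []).length ≤ row.length
instance (weighted_matrix : List (List Int)) : Decidable (Pre_get_pis_nis weighted_matrix) := by unfold Pre_get_pis_nis; infer_instance

def pvWitness_get_pis_nis : List (List Int) := [[1, 5], [3, 2]]

def Spec_get_pis_nis (weighted_matrix : List (List Int)) (out : List Int × List Int) : Prop := out = get_pis_nis_alt weighted_matrix
instance (weighted_matrix : List (List Int)) (out : List Int × List Int) : Decidable (Spec_get_pis_nis weighted_matrix out) := by unfold Spec_get_pis_nis; infer_instance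

-- ===== CLAIM (what is proved, stated in full; the proofs are below) =====
def Claim_equal_get_pis_nis : Prop := ∀ (weighted_matrix : List (List Int)), Dom_get_pis_nis weighted_matrix → Pre_get_pis_nis weighted_matrix → Spec_get_pis_nis weighted_matrix (get_pis_nis weighted_matrix)

-- ===== LEMMAS AND PROOFS =====

-- a list is the range-map of its own getD
theorem map_range_getD_self (l : List Int) :
    (List.range l.length).map (fun k => l.getD k 0) = l := by
  apply List.ext_getElem
  · simp
  · intro i h1 h2
    simp [List.getD_eq_getElem?_getD, List.getElem?_eq_getElem h2]

theorem getD_map_range (m k : Nat) (f : Nat → Int) (h : k < m) :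
    (((List.range m).map f).getD k 0) = f k := by
  rw [List.getD_eq_getElem?_getD]
  simp [h]

-- B's fold over the remaining rows, with accumulators in range-map form,
-- computes per-column folds of max/min.
theorem foldB_eq (rest : List (List Int)) (m : Nat) (f g : Nat → Int) :
    rest.foldl
      (fun (acc : List Int × List Int) row =>
        ((List.range m).map (fun k => max (acc.1.getD k 0) (row.getD k 0)),
         (List.range m).map (fun k => min (acc.2.getD k 0) (row.getD k 0))))
      ((List.range m).map f, (List.range m).map g)
    = ((List.range m).map (fun k => (rest.map (fun row => row.getD k 0)).foldl max (f k)),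
       (List.range m).map (fun k => (rest.map (fun row => row.getD k 0)).foldl min (g k))) := by
  induction rest generalizing f g with
  | nil => simp
  | cons r rs ih =>
    simp only [List.foldl_cons, List.map_cons]
    have h1 : (List.range m).map
        (fun k => max (((List.range m).map f).getD k 0) (r.getD k 0))
        = (List.range m).map (fun k => max (f k) (r.getD k 0)) := by
      apply List.map_congr_left
      intro k hk
      rw [getD_map_range m k f (List.mem_range.mp hk)]
    have h2 : (List.range m).map
        (fun k => min (((List.range m).map g).getD k 0) (r.getD k 0))
        = (List.range m).map (fun k => min (g k) (r.getD k 0)) := by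
      apply List.map_congr_left
      intro k hk
      rw [getD_map_range m k g (List.mem_range.mp hk)]
    rw [h1, h2, ih]

-- ===== VERDICT (by name: the statement is the Claim_ definition above) =====
theorem get_pis_nis_spec : Claim_equal_get_pis_nis := by
  intro wm _ hpre
  unfold Spec_get_pis_nis
  obtain ⟨hne, -⟩ := hpre
  match wm with
  | [] => exact absurd rfl hne
  | first :: rest =>
    simp only [get_pis_nis, get_pis_nis_alt, List.headD_cons]
    conv_rhs => rw [← map_range_getD_self first]
    simp only [List.length_map, List.length_range]
    rw [foldB_eq rest first.length (fun k => first.getD k 0) (fun k => first.getD k 0)]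
    simp [pyMax, pyMin]
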